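-- pv_equiv track=rewrite | github.com/jul17/Algoritm | algoritms_lab-master/Lab_3/Lab_3.py | calculate_all_possible_pairs
-- ===== SOURCE A (Python) =====
-- def calculate_all_possible_pairs(list_of_tribe):
--     all_possible_pairs = []
--     for tribe in list_of_tribe:
--         for men in tribe[0]:
--             for other_tribe in list_of_tribe:
--                 if tribe != other_tribe:
--                     for women in other_tribe[1]:
--                         all_possible_pairs.append([women, men])
--     return all_possible_pairs
-- ===== SOURCE B (Python) =====
-- def calculate_all_possible_pairs(list_of_tribe):
--     # Memoize the women pool per DISTINCT tribe value (hashable tuple key):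
--     # duplicate tribes share one pool computation, and no rescan happens per man.
--     pool_cache = {}
--     all_possible_pairs = []
--     for tribe in list_of_tribe:
--         men = tribe[0]
--         if not men:
--             continue
--         key = tuple(map(tuple, tribe))
--         if key not in pool_cache:
--             pool_cache[key] = [women for other in list_of_tribe
--                                if other != tribe for women in other[1]]
--         pool = pool_cache[key]
--         all_possible_pairs.extend([women, m] for m in men for women in pool)
--     return all_possible_pairs
-- ===== Notes on version B (the rewrite author's own statement) =====
-- stated objective: alternative
-- what changed: B memoizes one women pool per distinct tribe value in a dict keyed by a hashable tuple of the tribe and bulk-extends the pairs per tribe, instead of A's rescan of all other tribes (with list-equality tests) inside the per-man loop; tribes without men are skipped.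
import Mathlib
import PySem

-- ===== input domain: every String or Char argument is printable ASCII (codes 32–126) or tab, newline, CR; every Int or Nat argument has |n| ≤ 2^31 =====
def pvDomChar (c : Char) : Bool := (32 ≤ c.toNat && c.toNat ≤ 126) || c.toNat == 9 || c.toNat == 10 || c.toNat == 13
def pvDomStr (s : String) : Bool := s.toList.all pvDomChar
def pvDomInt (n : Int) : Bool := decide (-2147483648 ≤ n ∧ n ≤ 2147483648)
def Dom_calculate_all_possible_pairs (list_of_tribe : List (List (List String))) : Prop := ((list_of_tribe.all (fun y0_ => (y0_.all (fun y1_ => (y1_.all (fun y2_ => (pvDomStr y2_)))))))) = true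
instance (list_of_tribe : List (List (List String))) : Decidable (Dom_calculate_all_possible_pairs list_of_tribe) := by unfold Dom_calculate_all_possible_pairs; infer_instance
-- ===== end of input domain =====

-- B replaces A's per-man rescan of all other tribes by a dict-memoized women pool per
-- distinct tribe value, emitted with one bulk extend per tribe (alternative decomposition;
-- same output order). Equivalence is about the RETURN value; neither version mutates its argument.

-- ===== PORT A =====
-- tribe[0] / other_tribe[1] are total here via headD/getD; under Pre_ (below) the
-- indices are in range, so this matches Python exactly on the claimed inputs.
def calculate_all_possible_pairs (list_of_tribe : List (List (List String))) : List (List String) :=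
  list_of_tribe.foldl (fun acc tribe =>
    (tribe.headD []).foldl (fun acc men =>
      list_of_tribe.foldl (fun acc other_tribe =>
        if tribe ≠ other_tribe then
          (other_tribe.getD 1 []).foldl (fun acc women => acc ++ [[women, men]]) acc
        else acc) acc) acc) []

-- ===== PORT B =====
-- Python's cache key tuple(map(tuple, tribe)) compares equal exactly when the tribes are
-- equal as lists, so the Dict is keyed by the tribe itself; `key not in cache` is the
-- contains test, the assignment is insert, the comprehension is the guarded flatMap.
def calculate_all_possible_pairs_alt (list_of_tribe : List (List (List String))) : List (List String) :=
  (list_of_tribe.foldl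
    (fun (st : PySem.Dict (List (List String)) (List String) × List (List String)) tribe =>
      let men := tribe.headD []
      if men = [] then st
      else
        let cache :=
          if st.1.contains tribe then st.1
          else st.1.insert tribe
            (list_of_tribe.flatMap (fun other =>
              if other ≠ tribe then other.getD 1 [] else []))
        let pool := cache.getD tribe []
        (cache, st.2 ++ men.flatMap (fun m => pool.map (fun women => [women, m]))))
    (PySem.Dict.empty, [])).2

-- ===== PRECONDITION & SPEC =====
-- Pre_: exactly the inputs where Python A returns (no IndexError): every tribe is
-- nonempty (tribe[0] exists), and whenever a tribe has men, every other tribe that is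
-- compared against it has a women slot (length ≥ 2).
def Pre_calculate_all_possible_pairs (list_of_tribe : List (List (List String))) : Prop :=
  (∀ t ∈ list_of_tribe, t ≠ []) ∧
  (∀ t ∈ list_of_tribe, t.headD [] ≠ [] → ∀ u ∈ list_of_tribe, u ≠ t → 2 ≤ u.length)
instance (list_of_tribe : List (List (List String))) : Decidable (Pre_calculate_all_possible_pairs list_of_tribe) := by
  unfold Pre_calculate_all_possible_pairs; infer_instance

def pvWitness_calculate_all_possible_pairs : List (List (List String)) :=
  [[["m1"], ["w1"]], [["m2"], ["w2", "w3"]]]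

def Spec_calculate_all_possible_pairs (list_of_tribe : List (List (List String))) (out : List (List String)) : Prop := out = calculate_all_possible_pairs_alt list_of_tribe
instance (list_of_tribe : List (List (List String))) (out : List (List String)) : Decidable (Spec_calculate_all_possible_pairs list_of_tribe out) := by unfold Spec_calculate_all_possible_pairs; infer_instance

-- ===== CLAIM (what is proved, stated in full; the proofs are below) =====
def Claim_equal_calculate_all_possible_pairs : Prop := ∀ (list_of_tribe : List (List (List String))), Dom_calculate_all_possible_pairs list_of_tribe → Pre_calculate_all_possible_pairs list_of_tribe → Spec_calculate_all_possible_pairs list_of_tribe (calculate_all_possible_pairs list_of_tribe)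

-- ===== LEMMAS AND PROOFS =====

-- the women pool of a tribe and its per-tribe contribution to the output
def pvPool (l : List (List (List String))) (tribe : List (List String)) : List String :=
  l.flatMap (fun other => if other ≠ tribe then other.getD 1 [] else [])

def pvContrib (l : List (List (List String))) (tribe : List (List String)) : List (List String) :=
  (tribe.headD []).flatMap (fun m => (pvPool l tribe).map (fun women => [women, m]))

-- folding "append one pair" over a women list is mapping then appending
theorem pv_foldl_pairs (m : String) : ∀ (ws : List String) (acc : List (List String)),
    ws.foldl (fun a w => a ++ [[w, m]]) acc = acc ++ ws.map (fun w => [w, m])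
  | [], acc => by simp
  | w :: ws, acc => by simp [List.foldl_cons, pv_foldl_pairs m ws]

-- A's per-man scan of the other tribes appends the mapped pool
theorem pv_scan_eq (tribe : List (List String)) (m : String) :
    ∀ (l : List (List (List String))) (acc : List (List String)),
    l.foldl (fun a o => if tribe ≠ o then
        (o.getD 1 []).foldl (fun a w => a ++ [[w, m]]) a else a) acc
      = acc ++ (l.flatMap (fun o => if o ≠ tribe then o.getD 1 [] else [])).map (fun w => [w, m])
  | [], acc => by simp
  | o :: l, acc => by
    simp only [List.foldl_cons, List.flatMap_cons, pv_scan_eq tribe m l]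
    by_cases h : tribe = o
    · simp [h]
    · rw [if_pos (Ne.symm h), if_pos h, pv_foldl_pairs, List.map_append, List.append_assoc]

-- A equals the concatenation of the per-tribe contributions
theorem pvA_eq (l : List (List (List String))) :
    calculate_all_possible_pairs l = l.flatMap (pvContrib l) := by
  unfold calculate_all_possible_pairs
  have hstep : (fun (acc : List (List String)) (tribe : List (List String)) =>
      (tribe.headD []).foldl (fun acc men =>
        l.foldl (fun acc o => if tribe ≠ o then
          (o.getD 1 []).foldl (fun acc w => acc ++ [[w, men]]) acc else acc) acc) acc)
      = fun acc tribe => acc ++ pvContrib l tribe := by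
    funext acc tribe
    have hinner : (fun (a : List (List String)) (m : String) =>
        l.foldl (fun a o => if tribe ≠ o then
          (o.getD 1 []).foldl (fun a w => a ++ [[w, m]]) a else a) a)
        = fun a m => a ++ (pvPool l tribe).map (fun w => [w, m]) := by
      funext a m; exact pv_scan_eq tribe m l a
    rw [hinner, PySem.List.foldl_append_eq_flatMap]; rfl
  rw [hstep, PySem.List.foldl_append_eq_flatMap, List.nil_append]

-- B's fold, under the cache invariant, appends the per-tribe contributions
theorem pvB_go (l : List (List (List String))) :
    ∀ (rest : List (List (List String)))
      (cache : PySem.Dict (List (List String)) (List String)) (out : List (List String)),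
      (∀ k, cache.contains k = true → cache.getD k [] = pvPool l k) →
    (rest.foldl
      (fun (st : PySem.Dict (List (List String)) (List String) × List (List String)) tribe =>
        let men := tribe.headD []
        if men = [] then st
        else
          let cache :=
            if st.1.contains tribe then st.1
            else st.1.insert tribe
              (l.flatMap (fun other => if other ≠ tribe then other.getD 1 [] else []))
          let pool := cache.getD tribe []
          (cache, st.2 ++ men.flatMap (fun m => pool.map (fun women => [women, m]))))
      (cache, out)).2 = out ++ rest.flatMap (pvContrib l)
  | [], cache, out, _ => by simp
  | tribe :: rest, cache, out, hinv => by
    simp only [List.foldl_cons, List.flatMap_cons]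
    by_cases hm : tribe.headD [] = []
    · rw [if_pos hm, pvB_go l rest cache out hinv]
      simp only [pvContrib, hm, List.flatMap_nil, List.nil_append]
    · rw [if_neg hm]
      by_cases hc : cache.contains tribe = true
      · simp only [hc, if_true]
        rw [hinv tribe hc, ← List.append_assoc]
        exact pvB_go l rest cache _ hinv
      · simp only [hc, Bool.false_eq_true, if_false]
        have hinv' : ∀ k, ((cache.insert tribe (pvPool l tribe)).contains k = true) →
            (cache.insert tribe (pvPool l tribe)).getD k [] = pvPool l k := by
          intro k hk
          rw [PySem.Dict.getD_insert]
          by_cases hkt : k = tribe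
          · simp [hkt]
          · rw [if_neg hkt]
            rw [PySem.Dict.contains_insert] at hk
            have : cache.contains k = true := by
              cases h' : cache.contains k with
              | true => rfl
              | false => simp [h', hkt, beq_iff_eq] at hk
            exact hinv k this
        rw [PySem.Dict.getD_insert_self, ← List.append_assoc]
        exact pvB_go l rest _ _ hinv'

theorem pv_eq (l : List (List (List String))) :
    calculate_all_possible_pairs l = calculate_all_possible_pairs_alt l := by
  rw [pvA_eq]
  unfold calculate_all_possible_pairs_alt
  rw [pvB_go l l PySem.Dict.empty []
    (fun k hk => by simp [PySem.Dict.contains_empty] at hk)]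
  rfl

-- ===== VERDICT (by name: the statement is the Claim_ definition above) =====
theorem calculate_all_possible_pairs_spec : Claim_equal_calculate_all_possible_pairs := by
  intro l _ _
  unfold Spec_calculate_all_possible_pairs
  exact pv_eq l
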